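-- pv_equiv track=rewrite | github.com/Roshan-Thomas/web-interface-dataaug | helper.py | spl
-- ===== SOURCE A (Python) =====
-- def spl(text):
--   """
--   Helper function to split the sentence into three parts, first part, second part and augmented
--   word. This helps to color the augmented words in the front-end.
--
--   The augmented word is marked by a star from the augmenting functions and the star is removed
--   and then sentence is split into 3 to be processed in the frontend.
--
--   Input Parameters
--   ================
--   text => Sentence for splitting.
--
--   Return Parameters
--   =================
--   rep => Augmented Word (Will be coloured in the frontend).
--   fhalf => First half of the sentence.
--   shalf => Second half of the sentence (after the augmented word).
--   """
--
--   fhalf = []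
--   shalf = []
--   rep = ""
--   first = True
--   for w in text.split():
--     if "*" in w:
--       rep = w.replace("*","").replace("_"," ")
--       first = False
--     elif first:
--       fhalf.append(w)
--     else:
--       shalf.append(w)
--   fhalf = " ".join(fhalf)
--   shalf = " ".join(shalf)
--   return rep, fhalf, shalf
-- ===== SOURCE B (Python) =====
-- def spl(text):
--   words = text.split()
--   for i, w in enumerate(words):
--     if "*" in w:
--       rep = w.replace("*", "").replace("_", " ")
--       return rep, " ".join(words[:i]), " ".join(words[i + 1:])
--   return "", " ".join(words), ""
-- ===== Notes on version B (the rewrite author's own statement) =====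
-- stated objective: simpler
-- what changed: Replaces A's single pass threading a boolean found-a-star flag and two accumulator lists with a scan for the first starred word followed by slicing the word list around it.
-- intended difference: On texts with two or more '*'-marked words A returns the replacement taken from the LAST starred word while splitting at the first and silently dropping every other starred word from the tail; B returns the first starred word's replacement and the tail unchanged, the intended behaviour since the augmenter marks exactly one word. — e.g. on spl("a *b *c d"): A returns ("c", "a", "d"), B returns ("b", "a", "*c d")
import Mathlib
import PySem

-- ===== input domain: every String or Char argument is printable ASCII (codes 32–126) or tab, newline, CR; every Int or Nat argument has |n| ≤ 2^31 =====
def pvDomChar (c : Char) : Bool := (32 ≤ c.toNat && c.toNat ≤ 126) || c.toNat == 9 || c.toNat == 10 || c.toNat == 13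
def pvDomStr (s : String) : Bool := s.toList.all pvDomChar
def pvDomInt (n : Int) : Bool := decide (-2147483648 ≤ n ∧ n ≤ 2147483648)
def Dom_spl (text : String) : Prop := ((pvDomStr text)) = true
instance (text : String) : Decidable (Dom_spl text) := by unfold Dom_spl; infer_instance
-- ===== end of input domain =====

-- B scans for the first starred word and slices the word list around it, instead of A's
-- flag-threading accumulator pass (objective: simpler).

-- ===== PORT A =====
-- one loop iteration of A: state is (fhalf, shalf, rep, first)
def splStep (s : List String × List String × String × Bool) (w : String) :
    List String × List String × String × Bool :=
  if PySem.Str.isIn "*" w then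
    (s.1, s.2.1, PySem.Str.replace (PySem.Str.replace w "*" "") "_" " ", false)
  else if s.2.2.2 then
    (s.1 ++ [w], s.2.1, s.2.2.1, s.2.2.2)
  else
    (s.1, s.2.1 ++ [w], s.2.2.1, s.2.2.2)

def spl (text : String) : String × String × String :=
  let r := (PySem.Str.split₀ text).foldl splStep ([], [], "", true)
  (r.2.2.1, PySem.Str.join " " r.1, PySem.Str.join " " r.2.1)

-- ===== PORT B =====
-- B's 'for i, w in enumerate(words)' loop with its early return; the [] case is the
-- fall-through 'return "", " ".join(words), ""'
def splAltLoop (words : List String) : List (Int × String) → String × String × String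
  | [] => ("", PySem.Str.join " " words, "")
  | (i, w) :: rest =>
    if PySem.Str.isIn "*" w then
      (PySem.Str.replace (PySem.Str.replace w "*" "") "_" " ",
       PySem.Str.join " " (PySem.List.slice words none (some i)),
       PySem.Str.join " " (PySem.List.slice words (some (i + 1)) none))
    else splAltLoop words rest

def spl_alt (text : String) : String × String × String :=
  let words := PySem.Str.split₀ text
  splAltLoop words (PySem.List.enumerate words 0)

-- ===== PRECONDITION & SPEC =====
-- On texts with two or more '*'-marked words A returns the replacement taken from the LAST
-- starred word while splitting at the first and silently dropping every other starred word
-- from the tail; B returns the first starred word's replacement and the tail unchanged, the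
-- intended behaviour since the augmenter marks exactly one word.
def D_spl (text : String) : Prop :=
  2 ≤ ((PySem.Str.split₀ text).filter (fun w => PySem.Str.isIn "*" w)).length
instance (text : String) : Decidable (D_spl text) := by unfold D_spl; infer_instance

def Spec_spl (text : String) (out : String × String × String) : Prop := ¬ D_spl text → out = spl_alt text
instance (text : String) (out : String × String × String) : Decidable (Spec_spl text out) := by unfold Spec_spl; infer_instance

def pvDiffWitness_spl : String := "a *b *c d"
def pvDiffWitnessOut_spl : (String × String × String) × (String × String × String) :=
  (("c", "a", "d"), ("b", "a", "*c d"))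

-- ===== CLAIM (what is proved, stated in full; the proofs are below) =====
def Claim_unchanged_spl : Prop := ∀ (text : String), Dom_spl text → Spec_spl text (spl text)
def Claim_changed_spl : Prop := Dom_spl (pvDiffWitness_spl) ∧ D_spl (pvDiffWitness_spl) ∧ spl (pvDiffWitness_spl) = pvDiffWitnessOut_spl.1 ∧ spl_alt (pvDiffWitness_spl) = pvDiffWitnessOut_spl.2 ∧ pvDiffWitnessOut_spl.1 ≠ pvDiffWitnessOut_spl.2

-- ===== LEMMAS AND PROOFS =====

-- proof-side abbreviations
def pvStar (w : String) : Bool := PySem.Str.isIn "*" w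
def pvClean (w : String) : String := PySem.Str.replace (PySem.Str.replace w "*" "") "_" " "

lemma pv_fold_false (ws : List String) (fh sh : List String) (rep : String) :
    ws.foldl splStep (fh, sh, rep, false) =
      (fh, sh ++ ws.filter (fun w => !pvStar w),
       ws.foldl (fun a w => if pvStar w then pvClean w else a) rep, false) := by
  induction ws generalizing sh rep with
  | nil => simp
  | cons w r ih =>
    simp only [List.foldl_cons, List.filter_cons]
    by_cases h : pvStar w
    · rw [show splStep (fh, sh, rep, false) w = (fh, sh, pvClean w, false) by
        simp [splStep, pvStar, pvClean] at h ⊢; simp [h]]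
      simp [ih, h]
    · rw [show splStep (fh, sh, rep, false) w = (fh, sh ++ [w], rep, false) by
        simp [splStep, pvStar] at h ⊢; simp [h]]
      simp [ih, h]

lemma pv_fold_true (ws : List String) (fh sh : List String) (rep : String)
    (h : ∀ u ∈ ws, pvStar u = false) :
    ws.foldl splStep (fh, sh, rep, true) = (fh ++ ws, sh, rep, true) := by
  induction ws generalizing fh with
  | nil => simp
  | cons w r ih =>
    have hw := h w (by simp)
    simp only [List.foldl_cons]
    rw [show splStep (fh, sh, rep, true) w = (fh ++ [w], sh, rep, true) by
      simp [splStep, pvStar] at hw ⊢; simp [hw]]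
    rw [ih (fh ++ [w]) (fun u hu => h u (by simp [hu]))]
    simp

lemma pv_foldl_lastStar (r : List String) (c : String) :
    r.foldl (fun a w => if pvStar w then pvClean w else a) c =
      (match (r.filter pvStar).getLast? with
       | none => c
       | some y => pvClean y) := by
  induction r generalizing c with
  | nil => simp
  | cons w r ih =>
    simp only [List.foldl_cons, List.filter_cons]
    by_cases h : pvStar w
    · rw [if_pos h, ih, if_pos h, List.getLast?_cons]
      cases (r.filter pvStar).getLast? <;> simp
    · rw [if_neg h, ih, if_neg h]

lemma pv_loop_skip (words : List String) (l1 l2 : List (Int × String))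
    (h : ∀ p ∈ l1, pvStar p.2 = false) :
    splAltLoop words (l1 ++ l2) = splAltLoop words l2 := by
  induction l1 with
  | nil => rfl
  | cons p rest ih =>
    obtain ⟨i, w⟩ := p
    have hw := h (i, w) (by simp)
    simp only [pvStar] at hw
    simp only [List.cons_append, splAltLoop, hw]
    exact ih (fun q hq => h q (by simp [hq]))

-- the core equivalence, on an arbitrary word list, under 'at most one starred word'
lemma pv_main (ws : List String) (hd : (ws.filter pvStar).length ≤ 1) :
    (let r := ws.foldl splStep ([], [], "", true)
     ((r.2.2.1, PySem.Str.join " " r.1, PySem.Str.join " " r.2.1) : String × String × String)) =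
    splAltLoop ws (PySem.List.enumerate ws 0) := by
  by_cases hall : ∀ u ∈ ws, pvStar u = false
  · rw [pv_fold_true ws [] [] "" hall]
    rw [show PySem.List.enumerate ws 0 = PySem.List.enumerate ws 0 ++ [] by simp,
      pv_loop_skip ws _ [] (by
        intro p hp
        obtain ⟨k, hk, rfl⟩ := (PySem.List.mem_enumerate_iff _ _ _).mp hp
        exact hall _ (by simp))]
    simp [splAltLoop, PySem.Str.join]
  · have hdne : ws.dropWhile (fun u => !pvStar u) ≠ [] := by
      intro h0
      apply hall
      intro u hu
      rw [← List.takeWhile_append_dropWhile (p := fun u => !pvStar u) (l := ws), h0,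
        List.append_nil] at hu
      simpa using List.mem_takeWhile_imp hu
    obtain ⟨w, r, hwr⟩ := List.exists_cons_of_ne_nil hdne
    have hws : ws = ws.takeWhile (fun u => !pvStar u) ++ w :: r := by
      conv_lhs => rw [← List.takeWhile_append_dropWhile (p := fun u => !pvStar u) (l := ws)]
      rw [hwr]
    set t := ws.takeWhile (fun u => !pvStar u) with ht
    have hw : pvStar w = true := by
      have h2 := List.head_dropWhile_not (fun u => !pvStar u) hdne
      simp only [hwr, List.head_cons] at h2
      simpa using h2
    have htf : ∀ u ∈ t, pvStar u = false := by
      intro u hu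
      simpa using List.mem_takeWhile_imp hu
    -- with at most one star, the tail r is star-free
    have hrf : ∀ u ∈ r, pvStar u = false := by
      rw [hws, List.filter_append, List.filter_eq_nil_iff.mpr (fun u hu => by simp [htf u hu]),
        List.filter_cons_of_pos hw] at hd
      intro u hu
      by_contra hc
      have : u ∈ r.filter pvStar := List.mem_filter.mpr ⟨hu, by simpa using hc⟩
      have h1 : 1 ≤ (r.filter pvStar).length :=
        List.length_pos_iff.mpr (fun h0 => by simp [h0] at this)
      simp only [List.nil_append, List.length_cons] at hd
      omega
    rw [hws]
    -- A-side fold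
    rw [List.foldl_append, pv_fold_true t [] [] "" htf, List.foldl_cons]
    have hw' : PySem.Chars.isIn ['*'] w.toList = true := by
      simpa [pvStar, PySem.Str.isIn_eq] using hw
    rw [show splStep ([] ++ t, [], "", true) w = (t, [], pvClean w, false) by
      simp [splStep, hw', pvClean]]
    rw [pv_fold_false]
    have hfilt : r.filter (fun u => !pvStar u) = r :=
      List.filter_eq_self.mpr (fun u hu => by simp [hrf u hu])
    have hlast : (r.filter pvStar).getLast? = none := by
      rw [List.filter_eq_nil_iff.mpr (fun u hu => by simp [hrf u hu])]; rfl
    rw [pv_foldl_lastStar, hlast, hfilt]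
    -- B-side loop
    rw [PySem.List.enumerate_append, PySem.List.enumerate_cons,
      pv_loop_skip _ _ _ (by
        intro p hp
        obtain ⟨k, hk, rfl⟩ := (PySem.List.mem_enumerate_iff _ _ _).mp hp
        exact htf _ (by simp))]
    have hslice1 : PySem.List.slice (t ++ w :: r) none (some ((t.length : Nat) : Int)) = t := by
      rw [PySem.List.slice_to_natCast]; simp
    have hslice2 : PySem.List.slice (t ++ w :: r) (some (((t.length : Nat) : Int) + 1)) none = r := by
      rw [show (((t.length : Nat) : Int) + 1) = ((t.length + 1 : Nat) : Int) by push_cast; ring,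
        PySem.List.slice_from_natCast]
      simp [List.drop_append]
    simp [splAltLoop, hw', hslice1, hslice2, pvClean]

-- ===== VERDICT (by name: the statements are the Claim_ definitions above) =====
theorem spl_spec : Claim_unchanged_spl := by
  intro text _ hnd
  unfold D_spl at hnd
  show spl text = spl_alt text
  unfold spl spl_alt
  exact pv_main (PySem.Str.split₀ text) (by unfold pvStar; omega)

theorem spl_changed : Claim_changed_spl := by unfold Claim_changed_spl; decide
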